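-- pv_equiv track=rewrite | github.com/Omen-Frost/Square-Roots-in-Zp | test.py | fill_K
-- ===== SOURCE A (Python) =====
-- def fill_K(L):
--     # computes K(i,j)
--     k = len(L)
--     s = sum(L)+1
--     K = [[]]
--     for i in range(1, k+1):
--         elem = []
--         for j in range(0, i):
--             elem.append(s - sum(L[j:min(i, k-1)+1]))
--         K.append(elem)
--     return K
-- ===== SOURCE B (Python) =====
-- def fill_K(L):
--     # computes K(i,j) via a prefix-sum array: each slice sum in O(1)
--     k = len(L)
--     P = [0]
--     for x in L:
--         P.append(P[-1] + x)
--     s = P[k] + 1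
--     K = [[]]
--     for i in range(1, k + 1):
--         end = min(i, k - 1) + 1
--         K.append([s - P[end] + P[j] for j in range(i)])
--     return K
-- ===== Notes on version B (the rewrite author's own statement) =====
-- stated objective: faster
-- what changed: Replaced the per-entry re-summation of slices sum(L[j:...]) by a prefix-sum array built once, so each table entry is computed in O(1).
import Mathlib
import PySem

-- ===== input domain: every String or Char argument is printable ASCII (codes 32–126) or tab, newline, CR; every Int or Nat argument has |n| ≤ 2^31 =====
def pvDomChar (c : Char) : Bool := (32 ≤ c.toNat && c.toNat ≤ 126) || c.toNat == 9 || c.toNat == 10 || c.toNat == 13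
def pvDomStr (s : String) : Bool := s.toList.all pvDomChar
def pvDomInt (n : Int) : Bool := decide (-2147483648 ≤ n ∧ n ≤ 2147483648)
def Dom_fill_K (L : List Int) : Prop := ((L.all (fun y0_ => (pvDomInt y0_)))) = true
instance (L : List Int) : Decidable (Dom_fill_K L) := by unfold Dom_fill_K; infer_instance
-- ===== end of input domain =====

-- B replaces A's repeated slice re-summation by a prefix-sum array built once (asymptotically faster).

-- ===== PORT A =====
def fill_K (L : List Int) : List (List Int) :=
  let k : Int := L.length
  let s : Int := L.sum + 1
  (PySem.List.pyRange 1 (k + 1) 1).foldl (fun K i =>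
    K ++ [(PySem.List.pyRange 0 i 1).foldl (fun elem j =>
      elem ++ [s - (PySem.List.slice L (some j) (some (min i (k - 1) + 1))).sum]) []]) [[]]

-- ===== PORT B =====
-- P[end], P[j], P[k] are in-range non-negative indexings, ported exactly with pyGetD; P[-1] via pyGetD (-1).
def fill_K_alt (L : List Int) : List (List Int) :=
  let k : Int := L.length
  let P : List Int := L.foldl (fun P x => P ++ [PySem.List.pyGetD P (-1) 0 + x]) [0]
  let s : Int := PySem.List.pyGetD P k 0 + 1
  (PySem.List.pyRange 1 (k + 1) 1).foldl (fun K i =>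
    let e : Int := min i (k - 1) + 1
    K ++ [(PySem.List.pyRange 0 i 1).map (fun j =>
      s - PySem.List.pyGetD P e 0 + PySem.List.pyGetD P j 0)]) [[]]

-- ===== PRECONDITION & SPEC =====
def Spec_fill_K (L : List Int) (out : List (List Int)) : Prop := out = fill_K_alt L
instance (L : List Int) (out : List (List Int)) : Decidable (Spec_fill_K L out) := by unfold Spec_fill_K; infer_instance

-- ===== CLAIM (what is proved, stated in full; the proofs are below) =====
def Claim_equal_fill_K : Prop := ∀ (L : List Int), Dom_fill_K L → Spec_fill_K L (fill_K L)

-- ===== LEMMAS AND PROOFS =====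

-- B's loop builds exactly the list of prefix sums (stated with a general initial segment).
theorem fillK_P_gen (L : List Int) (acc : List Int) (c : Int) :
    L.foldl (fun P x => P ++ [PySem.List.pyGetD P (-1) 0 + x]) (acc ++ [c])
      = acc ++ (List.range (L.length + 1)).map (fun n => c + (L.take n).sum) := by
  induction L generalizing acc c with
  | nil => simp
  | cons x L ih =>
      simp only [List.foldl_cons, PySem.List.pyGetD_neg_one_append_singleton]
      rw [ih, List.append_assoc]
      congr 1
      rw [show (x :: L).length + 1 = (L.length + 1) + 1 from rfl, List.range_succ_eq_map]
      simp [List.map_map, Function.comp_def, add_assoc]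
      rw [show L.length + 2 = (L.length + 1) + 1 from rfl, List.range_succ_eq_map,
          List.range_succ_eq_map]
      simp [List.map_map, Function.comp_def, add_assoc]

theorem fillK_P_eq (L : List Int) :
    L.foldl (fun P x => P ++ [PySem.List.pyGetD P (-1) 0 + x]) [0]
      = (List.range (L.length + 1)).map (fun n => (L.take n).sum) := by
  simpa using fillK_P_gen L [] 0

-- Reading the prefix-sum list at an in-range index.
theorem fillK_P_get (L : List Int) (i : Int) (h0 : 0 ≤ i) (h1 : i ≤ L.length) :
    PySem.List.pyGetD ((List.range (L.length + 1)).map (fun n => (L.take n).sum)) i 0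
      = (L.take i.toNat).sum := by
  rw [PySem.List.pyGetD_eq_getElem _ 0 h0 (by simp; omega)]
  simp only [List.getElem_map, List.getElem_range]

-- A slice sum is a difference of two prefix sums.
theorem fillK_sum_drop_take (L : List Int) (a b : Nat) (hab : a ≤ b) :
    ((L.drop a).take (b - a)).sum = (L.take b).sum - (L.take a).sum := by
  have h : L.take a ++ (L.drop a).take (b - a) = L.take b := by
    calc L.take a ++ (L.drop a).take (b - a)
        = (L.take b).take a ++ (L.take b).drop a := by
          rw [List.take_take, min_eq_left hab, List.drop_take]
      _ = L.take b := List.take_append_drop _ _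
  have := congrArg List.sum h
  rw [List.sum_append] at this
  omega

-- ===== VERDICT (by name: the statement is the Claim_ definition above) =====
theorem fill_K_spec : Claim_equal_fill_K := by
  intro L _
  show fill_K L = fill_K_alt L
  simp only [fill_K, fill_K_alt, fillK_P_eq, PySem.List.foldl_append_singleton_eq_map]
  congr 1
  apply List.map_congr_left
  intro i hi
  rw [PySem.List.mem_pyRange_one] at hi
  apply List.map_congr_left
  intro j hj
  rw [PySem.List.mem_pyRange_one] at hj
  have hk1 : (1 : Int) ≤ L.length := le_trans hi.1 (by omega)
  have he0 : (0 : Int) ≤ min i ((L.length : Int) - 1) + 1 := by omega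
  have hek : min i ((L.length : Int) - 1) + 1 ≤ (L.length : Int) := by omega
  have hje : j < min i ((L.length : Int) - 1) + 1 := by omega
  rw [fillK_P_get L _ (by omega) (by exact_mod_cast le_refl _),
      fillK_P_get L _ he0 hek, fillK_P_get L _ hj.1 (by omega),
      PySem.List.slice_toNat L hj.1 he0,
      fillK_sum_drop_take L _ _ (by omega)]
  simp [Int.toNat_natCast, List.take_length]
  ring
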